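-- pv_equiv track=rewrite | github.com/peakyragnar/NativeLLM | src2/xbrl/xbrl_mapper.py | _identify_financial_statements
-- ===== SOURCE A (Python) =====
-- def _identify_financial_statements(mappings_by_role):
--     """
--     Identify financial statement types from role URIs.
--
--     Args:
--         mappings_by_role: Dictionary of mappings grouped by role
--
--     Returns:
--         Dictionary mapping statement types to lists of roles
--     """
--     financial_statements = {
--         "BALANCE_SHEET": [],
--         "INCOME_STATEMENT": [],
--         "CASH_FLOW_STATEMENT": [],
--         "STATEMENT_OF_EQUITY": [],
--         "OTHER": []
--     }
--
--     for role in mappings_by_role.keys():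
--         role_lower = role.lower()
--
--         if any(term in role_lower for term in ["balance", "financial position"]):
--             financial_statements["BALANCE_SHEET"].append(role)
--         elif any(term in role_lower for term in ["income", "operations", "earnings", "profit", "loss"]):
--             financial_statements["INCOME_STATEMENT"].append(role)
--         elif any(term in role_lower for term in ["cash flow", "cashflow"]):
--             financial_statements["CASH_FLOW_STATEMENT"].append(role)
--         elif any(term in role_lower for term in ["equity", "stockholder", "shareholder"]):
--             financial_statements["STATEMENT_OF_EQUITY"].append(role)
--         else:
--             financial_statements["OTHER"].append(role)
--
--     # Remove empty statement types
--     return {k: v for k, v in financial_statements.items() if v}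
-- ===== SOURCE B (Python) =====
-- _RULES = [
--     ("BALANCE_SHEET", ("balance", "financial position")),
--     ("INCOME_STATEMENT", ("income", "operations", "earnings", "profit", "loss")),
--     ("CASH_FLOW_STATEMENT", ("cash flow", "cashflow")),
--     ("STATEMENT_OF_EQUITY", ("equity", "stockholder", "shareholder")),
-- ]
--
-- _CATEGORIES = ["BALANCE_SHEET", "INCOME_STATEMENT", "CASH_FLOW_STATEMENT",
--                "STATEMENT_OF_EQUITY", "OTHER"]
--
--
-- def _classify(role):
--     role_lower = role.lower()
--     return next((name for name, terms in _RULES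
--                  if any(term in role_lower for term in terms)), "OTHER")
--
--
-- def _identify_financial_statements(mappings_by_role):
--     result = {}
--     for name in _CATEGORIES:
--         roles = [role for role in mappings_by_role.keys() if _classify(role) == name]
--         if roles:
--             result[name] = roles
--     return result
-- ===== Notes on version B (the rewrite author's own statement) =====
-- stated objective: idiomatic
-- what changed: A makes one pass over the roles appending into five pre-built mutable buckets and then filters empty ones; B inverts the traversal: a table-driven classifier maps a role to its first-matching category, and an outer loop over the five category names collects the matching roles per category, so no mutable bucket dict or empty-removal pass is needed.
import Mathlib
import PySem

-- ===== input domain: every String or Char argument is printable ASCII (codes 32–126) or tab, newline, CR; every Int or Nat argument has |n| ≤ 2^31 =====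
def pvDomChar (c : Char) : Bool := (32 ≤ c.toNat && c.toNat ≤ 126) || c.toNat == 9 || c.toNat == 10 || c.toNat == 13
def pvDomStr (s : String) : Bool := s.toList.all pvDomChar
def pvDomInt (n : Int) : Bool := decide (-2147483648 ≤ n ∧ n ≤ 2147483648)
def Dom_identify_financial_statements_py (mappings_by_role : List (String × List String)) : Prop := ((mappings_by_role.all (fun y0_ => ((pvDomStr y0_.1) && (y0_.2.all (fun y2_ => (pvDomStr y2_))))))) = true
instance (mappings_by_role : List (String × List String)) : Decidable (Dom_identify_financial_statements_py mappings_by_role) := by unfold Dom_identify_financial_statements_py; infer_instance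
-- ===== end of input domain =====

-- B: table-driven classifier + category-outer collection instead of A's role-outer pass into five mutable buckets; same results, idiomatic decomposition.


-- ===== PORT A =====
-- one loop iteration of A: classify `role` by the if/elif chain and append it to the bucket
def pvStepA (d : PySem.Dict String (List String)) (role : String) : PySem.Dict String (List String) :=
  let role_lower := PySem.Str.lower role
  if ["balance", "financial position"].any (fun term => PySem.Str.isIn term role_lower) then
    d.modify "BALANCE_SHEET" [] (· ++ [role])
  else if ["income", "operations", "earnings", "profit", "loss"].any (fun term => PySem.Str.isIn term role_lower) then
    d.modify "INCOME_STATEMENT" [] (· ++ [role])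
  else if ["cash flow", "cashflow"].any (fun term => PySem.Str.isIn term role_lower) then
    d.modify "CASH_FLOW_STATEMENT" [] (· ++ [role])
  else if ["equity", "stockholder", "shareholder"].any (fun term => PySem.Str.isIn term role_lower) then
    d.modify "STATEMENT_OF_EQUITY" [] (· ++ [role])
  else
    d.modify "OTHER" [] (· ++ [role])

def identify_financial_statements_py (mappings_by_role : List (String × List String)) : List (String × List String) :=
  let financial_statements : PySem.Dict String (List String) :=
    PySem.Dict.mk [("BALANCE_SHEET", []), ("INCOME_STATEMENT", []), ("CASH_FLOW_STATEMENT", []),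
                   ("STATEMENT_OF_EQUITY", []), ("OTHER", [])]
  let financial_statements := (mappings_by_role.map Prod.fst).foldl pvStepA financial_statements
  -- {k: v for k, v in financial_statements.items() if v}
  financial_statements.items.filter (fun kv => !kv.2.isEmpty)

-- ===== PORT B =====
def pvRules : List (String × List String) :=
  [("BALANCE_SHEET", ["balance", "financial position"]),
   ("INCOME_STATEMENT", ["income", "operations", "earnings", "profit", "loss"]),
   ("CASH_FLOW_STATEMENT", ["cash flow", "cashflow"]),
   ("STATEMENT_OF_EQUITY", ["equity", "stockholder", "shareholder"])]

def pvCategories : List String :=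
  ["BALANCE_SHEET", "INCOME_STATEMENT", "CASH_FLOW_STATEMENT", "STATEMENT_OF_EQUITY", "OTHER"]

-- _classify: first rule whose any-term matches, else "OTHER"
def pvClassify (role : String) : String :=
  let role_lower := PySem.Str.lower role
  ((pvRules.find? (fun p => p.2.any (fun term => PySem.Str.isIn term role_lower))).map Prod.fst).getD "OTHER"

def identify_financial_statements_py_alt (mappings_by_role : List (String × List String)) : List (String × List String) :=
  (pvCategories.foldl
    (fun result name =>
      let roles := (mappings_by_role.map Prod.fst).filter (fun role => pvClassify role == name)
      if roles.isEmpty then result else result.insert name roles)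
    PySem.Dict.empty).items

-- ===== PRECONDITION & SPEC =====
def Spec_identify_financial_statements_py (mappings_by_role : List (String × List String)) (out : List (String × List String)) : Prop := out = identify_financial_statements_py_alt mappings_by_role
instance (mappings_by_role : List (String × List String)) (out : List (String × List String)) : Decidable (Spec_identify_financial_statements_py mappings_by_role out) := by unfold Spec_identify_financial_statements_py; infer_instance

-- ===== CLAIM (what is proved, stated in full; the proofs are below) =====
def Claim_equal_identify_financial_statements_py : Prop := ∀ (mappings_by_role : List (String × List String)), Dom_identify_financial_statements_py mappings_by_role → Spec_identify_financial_statements_py mappings_by_role (identify_financial_statements_py mappings_by_role)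

-- ===== LEMMAS AND PROOFS =====

-- A's if/elif chain appends `role` to exactly the bucket pvClassify picks
lemma pvStepA_eq (d : PySem.Dict String (List String)) (role : String) :
    pvStepA d role = d.modify (pvClassify role) [] (· ++ [role]) := by
  simp only [pvStepA, pvClassify, pvRules]
  split_ifs with h1 h2 h3 h4 <;>
    simp only [List.find?, List.any_cons, List.any_nil, Bool.or_false, Bool.not_eq_true] at * <;>
    simp only [*] <;> rfl

lemma pvClassify_mem (role : String) : pvClassify role ∈ pvCategories := by
  simp only [pvClassify]
  cases hf : pvRules.find? (fun p => p.2.any fun term => PySem.Str.isIn term (PySem.Str.lower role)) with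
  | none => simp [pvCategories]
  | some p =>
      have hp := List.mem_of_find?_eq_some hf
      simp only [pvRules, List.mem_cons, List.not_mem_nil, or_false] at hp
      rcases hp with rfl | rfl | rfl | rfl <;> simp [pvCategories]

lemma foldl_stepA_getD (l : List String) (d : PySem.Dict String (List String)) (c : String) :
    (l.foldl pvStepA d).getD c [] = d.getD c [] ++ l.filter (fun x => pvClassify x == c) := by
  induction l generalizing d with
  | nil => simp
  | cons x xs ih =>
      simp only [List.foldl_cons, List.filter_cons, ih, pvStepA_eq, PySem.Dict.getD_modify]
      by_cases hx : pvClassify x = c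
      · simp [hx]
      · have hcx : ¬(c = pvClassify x) := fun h => hx h.symm
        simp [hx, hcx]

-- ===== VERDICT (by name: the statement is the Claim_ definition above) =====

theorem identify_financial_statements_py_spec : Claim_equal_identify_financial_statements_py := by
  intro m _hdom
  unfold Spec_identify_financial_statements_py
  simp only [identify_financial_statements_py, identify_financial_statements_py_alt]
  have hstep : pvStepA = fun d x => d.modify (pvClassify x) [] (· ++ [x]) :=
    funext fun d => funext fun x => pvStepA_eq d x
  set keys := m.map Prod.fst with hkeys
  have hkeysfold : ((keys.foldl pvStepA (PySem.Dict.mk [("BALANCE_SHEET", []), ("INCOME_STATEMENT", []),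
      ("CASH_FLOW_STATEMENT", []), ("STATEMENT_OF_EQUITY", []), ("OTHER", [])])).keys) = pvCategories := by
    rw [hstep, PySem.Dict.keys_foldl_modify_key, PySem.Set.update_eq_append_filter]
    have hfil : (PySem.Set.ofList (keys.map pvClassify)).filter
        (fun y => !(PySem.Set.contains (PySem.Dict.keys (PySem.Dict.mk [("BALANCE_SHEET", ([] : List String)), ("INCOME_STATEMENT", []),
          ("CASH_FLOW_STATEMENT", []), ("STATEMENT_OF_EQUITY", []), ("OTHER", [])])) y)) = [] := by
      rw [List.filter_eq_nil_iff]
      intro y hy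
      have hy' : y ∈ keys.map pvClassify := by simpa using hy
      rcases List.mem_map.mp hy' with ⟨r, _, rfl⟩
      have hmem := pvClassify_mem r
      simp only [pvCategories] at hmem
      simp [hmem]
    rw [hfil]
    simp [pvCategories]
  have hnodup : ((keys.foldl pvStepA (PySem.Dict.mk [("BALANCE_SHEET", []), ("INCOME_STATEMENT", []),
      ("CASH_FLOW_STATEMENT", []), ("STATEMENT_OF_EQUITY", []), ("OTHER", [])])).keys).Nodup := by
    rw [hkeysfold]; decide
  have hitems : (keys.foldl pvStepA (PySem.Dict.mk [("BALANCE_SHEET", []), ("INCOME_STATEMENT", []),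
      ("CASH_FLOW_STATEMENT", []), ("STATEMENT_OF_EQUITY", []), ("OTHER", [])])).items =
      pvCategories.map (fun c => (c, keys.filter (fun x => pvClassify x == c))) := by
    rw [PySem.Dict.items_eq_map_keys _ hnodup [], hkeysfold]
    refine List.map_congr_left ?_
    intro c hc
    rw [foldl_stepA_getD]
    have h0 : (PySem.Dict.mk [("BALANCE_SHEET", ([] : List String)), ("INCOME_STATEMENT", []),
        ("CASH_FLOW_STATEMENT", []), ("STATEMENT_OF_EQUITY", []), ("OTHER", [])]).getD c [] = [] := by
      fin_cases hc <;> decide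
    rw [h0, List.nil_append]
  rw [hitems]
  simp only [pvCategories, List.map_cons, List.map_nil, List.foldl_cons, List.foldl_nil]
  by_cases h1 : (keys.filter (fun x => pvClassify x == "BALANCE_SHEET")).isEmpty <;>
  by_cases h2 : (keys.filter (fun x => pvClassify x == "INCOME_STATEMENT")).isEmpty <;>
  by_cases h3 : (keys.filter (fun x => pvClassify x == "CASH_FLOW_STATEMENT")).isEmpty <;>
  by_cases h4 : (keys.filter (fun x => pvClassify x == "STATEMENT_OF_EQUITY")).isEmpty <;>
  by_cases h5 : (keys.filter (fun x => pvClassify x == "OTHER")).isEmpty <;>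
    simp [h1, h2, h3, h4, h5, PySem.Dict.insert, PySem.Dict.empty]
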